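-- pv_equiv track=rewrite | github.com/RadiCarolAlin/Python_Aplication | FunctionForArhitectExcel.py | conversionInt8
-- ===== SOURCE A (Python) =====
-- def reverse(string):  # returns the reversed string
--     string = "".join(reversed(string))
--     return string
--
-- def hexCorrespond(string):  # this function is used for hex conversion
--     if string == 10:
--         string = "A"
--     elif string == 11:
--         string = "B"
--     elif string == 12:
--         string = "C"
--     elif string == 13:
--         string = "D"
--     elif string == 14:
--         string = "E"
--     elif string == 15:
--         string = "F"
--     else:
--         return string
--     return string
--
-- def conversionInt8(value):  # converts a value to write hex value
--     if len(value) <= 4 or int(value, 16) == 0: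
--         value = int(value, 16)
--         string = ""
--         while value != 0:
--             string = string + str(value % 2)
--             value = value // 2
--         string = reverse(string)
--         string = string.zfill(8)
--         string1 = string[0:4]
--         string2 = string[4:8]
--         string1 = int(string1, 2)
--         string2 = int(string2, 2)
--         string1 = str(hexCorrespond(string1))
--         string2 = str(hexCorrespond(string2))
--         value = string1 + string2
--         value = "0x" + value
--     return value
-- ===== SOURCE B (Python) =====
-- def conversionInt8(value):  # converts a value to write hex value
--     # simpler: binary string via format(), slice into nibbles, format each as an uppercase hex digit
--     if len(value) <= 4 or int(value, 16) == 0: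
--         n = int(value, 16)
--         bits = format(n, 'b').zfill(8)
--         hi = int(bits[0:4], 2)
--         lo = int(bits[4:8], 2)
--         value = '0x' + format(hi, 'X') + format(lo, 'X')
--     return value
-- ===== Notes on version B (the rewrite author's own statement) =====
-- stated objective: simpler
-- what changed: Replaces A's manual division loop + string-reverse helper + if/elif hex-letter cascade by format(n,'b') for the padded binary string and format(_, 'X') for each nibble, keeping the pad-then-slice shape so values above 255 and 0 behave identically.
import Mathlib
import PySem

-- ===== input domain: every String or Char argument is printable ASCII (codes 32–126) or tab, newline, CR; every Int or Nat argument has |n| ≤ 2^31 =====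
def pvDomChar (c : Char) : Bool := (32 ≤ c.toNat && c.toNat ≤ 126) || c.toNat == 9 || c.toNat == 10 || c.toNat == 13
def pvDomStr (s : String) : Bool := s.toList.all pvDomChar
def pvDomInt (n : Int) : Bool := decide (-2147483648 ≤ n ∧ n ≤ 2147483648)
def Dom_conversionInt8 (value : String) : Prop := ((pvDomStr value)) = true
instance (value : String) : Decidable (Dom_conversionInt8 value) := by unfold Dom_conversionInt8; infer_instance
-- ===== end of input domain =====

-- B replaces A's manual division loop, reverse helper and if/elif hex cascade by format(n,'b') / format(_,'X'): simpler, same cost.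

-- ===== PORT A =====

-- "".join(reversed(string))
def reverseChars (s : List Char) : List Char := s.reverse

-- int(s, 2): hand port, exact on every reachable argument (a 4-character string of '0'/'1' digits)
def binNibble (cs : List Char) : Nat := cs.foldl (fun a c => 2 * a + (if c = '1' then 1 else 0)) 0

-- the while loop: string = string + str(value % 2); value = value // 2
-- (fuel-structural so it is kernel-reducible; fuel = initial n always suffices since n halves each step)
def binLoopA (fuel : Nat) (n : Nat) (acc : List Char) : List Char :=
  match fuel with
  | 0 => acc
  | fuel + 1 =>
      if n = 0 then acc
      else binLoopA fuel (n / 2) (acc ++ PySem.Int.toChars ((n % 2 : Nat) : Int))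

-- str(hexCorrespond(m)) (hexCorrespond returns a letter for 10..15, otherwise its int argument, then str() is applied)
def hexCorrespondA (m : Nat) : String :=
  if m = 10 then "A"
  else if m = 11 then "B"
  else if m = 12 then "C"
  else if m = 13 then "D"
  else if m = 14 then "E"
  else if m = 15 then "F"
  else PySem.Int.toStr (m : Int)

def conversionInt8 (value : String) : String :=
  match PySem.Int.ofStrBase? value 16 with
  | none => value   -- int(value, 16) raises ValueError here (excluded by Pre_)
  | some n =>
    if value.length ≤ 4 ∨ n = 0 then
      -- n.toNat: for n < 0 the while loop diverges in Python (excluded by Pre_)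
      let s := PySem.Chars.zfill (reverseChars (binLoopA n.toNat n.toNat [])) 8
      let s1 := PySem.List.slice s (some 0) (some 4)
      let s2 := PySem.List.slice s (some 4) (some 8)
      "0x" ++ hexCorrespondA (binNibble s1) ++ hexCorrespondA (binNibble s2)
    else value

-- ===== PORT B =====

-- format(m, 'X'): general-purpose uppercase hex formatter, fuel-structural (fuel = m + 1 always suffices)
def hexDigitUp (m : Nat) : Char := if m < 10 then Char.ofNat (48 + m) else Char.ofNat (55 + m)

def hexUpper (fuel : Nat) (m : Nat) : List Char :=
  match fuel with
  | 0 => []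
  | fuel + 1 =>
      if m < 16 then [hexDigitUp m]
      else hexUpper fuel (m / 16) ++ [hexDigitUp (m % 16)]

def conversionInt8_alt (value : String) : String :=
  match PySem.Int.ofStrBase? value 16 with
  | none => value   -- int(value, 16) raises ValueError here (excluded by Pre_)
  | some n =>
    if value.length ≤ 4 ∨ n = 0 then
      let bits := PySem.Chars.zfill (PySem.Int.toBinChars n) 8   -- format(n,'b').zfill(8)
      let hi := binNibble (bits.take 4)                           -- int(bits[0:4], 2)
      let lo := binNibble ((bits.drop 4).take 4)                  -- int(bits[4:8], 2)
      "0x" ++ String.ofList (hexUpper (hi + 1) hi) ++ String.ofList (hexUpper (lo + 1) lo)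
    else value

-- ===== PRECONDITION & SPEC =====
-- Pre_ excludes only inputs where A does not return: int(value,16) raises ValueError (unparseable strings),
-- and negative parsed values whose string has length <= 4, on which A's while loop never terminates.
def Pre_conversionInt8 (value : String) : Prop :=
  (PySem.Int.ofStrBase? value 16).isSome = true ∧
  (0 ≤ (PySem.Int.ofStrBase? value 16).getD 0 ∨ 4 < value.length)
instance (value : String) : Decidable (Pre_conversionInt8 value) := by
  unfold Pre_conversionInt8; infer_instance

def pvWitness_conversionInt8 : String := "ff"

def Spec_conversionInt8 (value : String) (out : String) : Prop := out = conversionInt8_alt value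
instance (value : String) (out : String) : Decidable (Spec_conversionInt8 value out) := by
  unfold Spec_conversionInt8; infer_instance

-- ===== CLAIM (what is proved, stated in full; the proofs are below) =====
def Claim_equal_conversionInt8 : Prop := ∀ (value : String), Dom_conversionInt8 value → Pre_conversionInt8 value → Spec_conversionInt8 value (conversionInt8 value)

-- ===== LEMMAS AND PROOFS =====

theorem binLoopA_zero (fuel : Nat) (acc : List Char) : binLoopA fuel 0 acc = acc := by
  cases fuel <;> simp [binLoopA]

theorem binLoopA_append (fuel : Nat) : ∀ (n : Nat) (acc : List Char),
    binLoopA fuel n acc = acc ++ binLoopA fuel n [] := by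
  induction fuel with
  | zero => intro n acc; simp [binLoopA]
  | succ fuel ih =>
    intro n acc
    by_cases h : n = 0
    · simp [h, binLoopA]
    · simp only [binLoopA, if_neg h]
      rw [ih (n / 2) (acc ++ PySem.Int.toChars ((n % 2 : Nat) : Int)),
          ih (n / 2) ([] ++ PySem.Int.toChars ((n % 2 : Nat) : Int))]
      simp

theorem toChars_mod_two (n : Nat) :
    PySem.Int.toChars ((n % 2 : Nat) : Int) = [Nat.digitChar (n % 2)] := by
  rcases Nat.mod_two_eq_zero_or_one n with h | h <;> rw [h] <;> decide

theorem binRev_core : ∀ (n fuelA fuelC : Nat) (ds : List Char), 0 < n → n ≤ fuelA → n < fuelC →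
    (binLoopA fuelA n []).reverse ++ ds = Nat.toDigitsCore 2 fuelC n ds := by
  intro n
  induction n using Nat.strong_induction_on with
  | _ n ih =>
    intro fuelA fuelC ds hn hA hC
    obtain ⟨fA, rfl⟩ : ∃ fA, fuelA = fA + 1 := ⟨fuelA - 1, by omega⟩
    obtain ⟨fC, rfl⟩ : ∃ fC, fuelC = fC + 1 := ⟨fuelC - 1, by omega⟩
    have hdiv : n / 2 < n := Nat.div_lt_self hn (by omega)
    simp only [binLoopA, if_neg (by omega : ¬ n = 0)]
    rw [binLoopA_append, Nat.toDigitsCore]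
    simp only [List.nil_append, toChars_mod_two]
    by_cases h2 : n / 2 = 0
    · have h1 : n = 1 := by omega
      subst h1
      simp [h2, binLoopA_zero]
    · simp only [if_neg h2]
      rw [List.reverse_append]
      have := ih (n / 2) hdiv fA fC (Nat.digitChar (n % 2) :: ds)
        (by omega) (by omega) (by omega)
      simpa using this

theorem bits_eq (m : Nat) :
    PySem.Chars.zfill (reverseChars (binLoopA m m [])) 8
      = PySem.Chars.zfill (PySem.Int.toBinChars (m : Int)) 8 := by
  have htb : PySem.Int.toBinChars (m : Int) = Nat.toDigits 2 m := by
    rw [PySem.Int.toBinChars, if_neg (by omega)]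
    rfl
  rw [htb, reverseChars]
  by_cases hm : m = 0
  · subst hm; decide
  · have hrev := binRev_core m m (m + 1) [] (by omega) (by omega) (by omega)
    rw [List.append_nil] at hrev
    have hdig : Nat.toDigits 2 m = Nat.toDigitsCore 2 (m + 1) m [] := rfl
    rw [hdig, ← hrev]

theorem binNibble_aux (cs : List Char) : ∀ a : Nat,
    cs.foldl (fun a c => 2 * a + (if c = '1' then 1 else 0)) a < (a + 1) * 2 ^ cs.length := by
  induction cs with
  | nil => intro a; simp
  | cons c t ih =>
    intro a
    have hd : (if c = '1' then 1 else 0) ≤ 1 := by split <;> omega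
    calc t.foldl (fun a c => 2 * a + (if c = '1' then 1 else 0)) (2 * a + (if c = '1' then 1 else 0))
        < (2 * a + (if c = '1' then 1 else 0) + 1) * 2 ^ t.length := ih _
      _ ≤ (2 * (a + 1)) * 2 ^ t.length := Nat.mul_le_mul_right _ (by omega)
      _ = (a + 1) * 2 ^ (c :: t).length := by
          simp [List.length_cons, Nat.pow_succ]; ring

theorem binNibble_lt16 (cs : List Char) (h : cs.length ≤ 4) : binNibble cs < 16 := by
  calc binNibble cs < 1 * 2 ^ cs.length := binNibble_aux cs 0
    _ ≤ 1 * 2 ^ 4 := Nat.mul_le_mul_left _ (Nat.pow_le_pow_right (by omega) h)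
    _ = 16 := by norm_num

theorem hexAgree : ∀ m : Nat, m < 16 →
    hexCorrespondA m = String.ofList (hexUpper (m + 1) m) := by decide

-- ===== VERDICT (by name: the statement is the Claim_ definition above) =====
theorem conversionInt8_spec : Claim_equal_conversionInt8 := by
  intro value _hdom hpre
  unfold Pre_conversionInt8 at hpre
  obtain ⟨hs, hd⟩ := hpre
  unfold Spec_conversionInt8 conversionInt8 conversionInt8_alt
  cases h : PySem.Int.ofStrBase? value 16 with
  | none => simp [h] at hs
  | some n =>
    rw [h] at hd
    simp only [Option.getD_some] at hd
    simp only [h]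
    by_cases hg : value.length ≤ 4 ∨ n = 0
    · simp only [if_pos hg]
      have hn : 0 ≤ n := by
        rcases hd with h0 | hlen
        · exact h0
        · rcases hg with hle | h0 <;> omega
      obtain ⟨m, rfl⟩ : ∃ m : Nat, n = (m : Int) := ⟨n.toNat, (Int.toNat_of_nonneg hn).symm⟩
      have htn : ((m : Int)).toNat = m := rfl
      rw [htn, bits_eq m]
      set bits := PySem.Chars.zfill (PySem.Int.toBinChars (m : Int)) 8 with hbits
      have hs1 : PySem.List.slice bits (some 0) (some 4) = bits.take 4 := by
        rw [PySem.List.slice_zero_start, PySem.List.slice_to bits (by omega)]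
        rfl
      have hs2 : PySem.List.slice bits (some 4) (some 8) = (bits.drop 4).take 4 := by
        rw [PySem.List.slice_toNat bits (by omega) (by omega)]
        rfl
      rw [hs1, hs2]
      rw [hexAgree _ (binNibble_lt16 _ (by simpa using List.length_take_le 4 bits)),
          hexAgree _ (binNibble_lt16 _ (by simpa using List.length_take_le 4 (bits.drop 4)))]
    · simp only [if_neg hg]
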